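-- pv_equiv track=rewrite | github.com/nomadichustler/agenthack_glucoAudio | app/services/context_service.py | analyze_symptom_constellation
-- ===== SOURCE A (Python) =====
-- def analyze_symptom_constellation(symptoms):
--     """Analyze symptom constellation for glucose direction"""
--     if not symptoms or len(symptoms) == 0:
--         return {
--             "cluster_type": "Asymptomatic",
--             "direction": "Neutral",
--             "urgency": "Low"
--         }
--
--     # Define symptom groups
--     hyperglycemia_symptoms = [
--         "Unusual thirst or dry mouth",
--         "Frequent urination",
--         "Blurred vision"
--     ]
--
--     hypoglycemia_symptoms = [
--         "Shakiness or tremors",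
--         "Confusion or difficulty concentrating"
--     ]
--
--     nonspecific_symptoms = [
--         "Fatigue or drowsiness",
--         "Nausea or vomiting"
--     ]
--
--     # Count symptoms in each category
--     hyper_count = sum(1 for s in symptoms if s in hyperglycemia_symptoms)
--     hypo_count = sum(1 for s in symptoms if s in hypoglycemia_symptoms)
--     nonspecific_count = sum(1 for s in symptoms if s in nonspecific_symptoms)
--
--     # Determine direction
--     if hyper_count > hypo_count:
--         direction = "Hyperglycemic"
--         cluster_type = "Hyperglycemia Cluster"
--     elif hypo_count > hyper_count:
--         direction = "Hypoglycemic"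
--         cluster_type = "Hypoglycemia Cluster"
--     else:
--         direction = "Mixed"
--         cluster_type = "Mixed Symptom Cluster"
--
--     # Determine urgency
--     total_symptoms = len(symptoms)
--     if total_symptoms >= 3:
--         urgency = "High"
--     elif total_symptoms == 2:
--         urgency = "Moderate"
--     else:
--         urgency = "Low"
--
--     # Increase urgency for specific concerning symptoms
--     if "Confusion or difficulty concentrating" in symptoms:
--         urgency = "High"
--
--     return {
--         "cluster_type": cluster_type,
--         "direction": direction,
--         "urgency": urgency
--     }
-- ===== SOURCE B (Python) =====
-- _CATEGORY = {
--     "Unusual thirst or dry mouth": "hyper",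
--     "Frequent urination": "hyper",
--     "Blurred vision": "hyper",
--     "Shakiness or tremors": "hypo",
--     "Confusion or difficulty concentrating": "hypo",
-- }
--
-- _CONFUSION = "Confusion or difficulty concentrating"
--
--
-- def analyze_symptom_constellation(symptoms):
--     """Analyze symptom constellation for glucose direction"""
--     if not symptoms or len(symptoms) == 0:
--         return {
--             "cluster_type": "Asymptomatic",
--             "direction": "Neutral",
--             "urgency": "Low",
--         }
--
--     hyper_count = 0
--     hypo_count = 0
--     confusion_seen = False
--     for s in symptoms:
--         cat = _CATEGORY.get(s)
--         if cat == "hyper":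
--             hyper_count += 1
--         elif cat == "hypo":
--             hypo_count += 1
--             if s == _CONFUSION:
--                 confusion_seen = True
--
--     if hyper_count > hypo_count:
--         direction, cluster_type = "Hyperglycemic", "Hyperglycemia Cluster"
--     elif hypo_count > hyper_count:
--         direction, cluster_type = "Hypoglycemic", "Hypoglycemia Cluster"
--     else:
--         direction, cluster_type = "Mixed", "Mixed Symptom Cluster"
--
--     if confusion_seen:
--         urgency = "High"
--     elif len(symptoms) >= 3:
--         urgency = "High"
--     elif len(symptoms) == 2:
--         urgency = "Moderate"
--     else:
--         urgency = "Low"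
--
--     return {
--         "cluster_type": cluster_type,
--         "direction": direction,
--         "urgency": urgency,
--     }
-- ===== Notes on version B (the rewrite author's own statement) =====
-- stated objective: alternative
-- what changed: Replaces the three separate membership-scan comprehensions (plus a separate 'in' scan for the confusion override) with one symptom-to-category dict index and a single pass over symptoms that maintains hyper/hypo counts and a confusion flag; the unused nonspecific count disappears.
import Mathlib
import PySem

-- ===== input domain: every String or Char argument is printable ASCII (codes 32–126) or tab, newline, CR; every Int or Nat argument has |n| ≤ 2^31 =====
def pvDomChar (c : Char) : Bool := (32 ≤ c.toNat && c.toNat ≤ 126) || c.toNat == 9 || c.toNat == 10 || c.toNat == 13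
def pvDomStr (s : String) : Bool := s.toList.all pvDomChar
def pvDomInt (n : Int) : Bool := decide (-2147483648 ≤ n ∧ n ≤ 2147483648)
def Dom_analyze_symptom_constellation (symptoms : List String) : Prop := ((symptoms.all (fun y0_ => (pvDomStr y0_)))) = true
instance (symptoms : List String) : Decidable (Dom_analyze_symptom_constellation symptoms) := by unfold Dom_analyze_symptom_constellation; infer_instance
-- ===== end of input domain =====

-- B replaces A's three membership-scan comprehensions plus a fourth 'in' scan with one
-- symptom→category dict and a single pass maintaining counts and a confusion flag (alternative decomposition).

-- ===== PORT A =====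
def pvHyperL : List String :=
  ["Unusual thirst or dry mouth", "Frequent urination", "Blurred vision"]
def pvHypoL : List String :=
  ["Shakiness or tremors", "Confusion or difficulty concentrating"]
def pvNonspecL : List String :=
  ["Fatigue or drowsiness", "Nausea or vomiting"]

def analyze_symptom_constellation (symptoms : List String) : List (String × String) :=
  if symptoms.isEmpty then
    [("cluster_type", "Asymptomatic"), ("direction", "Neutral"), ("urgency", "Low")]
  else
    let hyper_count : Int :=
      symptoms.foldl (fun acc s => if pvHyperL.contains s then acc + 1 else acc) 0
    let hypo_count : Int :=
      symptoms.foldl (fun acc s => if pvHypoL.contains s then acc + 1 else acc) 0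
    let _nonspecific_count : Int :=
      symptoms.foldl (fun acc s => if pvNonspecL.contains s then acc + 1 else acc) 0
    let dc : String × String :=
      if hyper_count > hypo_count then ("Hyperglycemic", "Hyperglycemia Cluster")
      else if hypo_count > hyper_count then ("Hypoglycemic", "Hypoglycemia Cluster")
      else ("Mixed", "Mixed Symptom Cluster")
    let total_symptoms : Int := (symptoms.length : Int)
    let urgency0 : String :=
      if total_symptoms ≥ 3 then "High"
      else if total_symptoms = 2 then "Moderate"
      else "Low"
    let urgency : String :=
      if symptoms.contains "Confusion or difficulty concentrating" then "High" else urgency0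
    [("cluster_type", dc.2), ("direction", dc.1), ("urgency", urgency)]

-- ===== PORT B =====
def pvCategory : PySem.Dict String String :=
  PySem.Dict.ofList
    [("Unusual thirst or dry mouth", "hyper"),
     ("Frequent urination", "hyper"),
     ("Blurred vision", "hyper"),
     ("Shakiness or tremors", "hypo"),
     ("Confusion or difficulty concentrating", "hypo")]

def pvConfusion : String := "Confusion or difficulty concentrating"

def pvStepB (st : Int × Int × Bool) (s : String) : Int × Int × Bool :=
  let cat := pvCategory.get? s
  if cat == some "hyper" then (st.1 + 1, st.2.1, st.2.2)
  else if cat == some "hypo" then (st.1, st.2.1 + 1, st.2.2 || (s == pvConfusion))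
  else st

def analyze_symptom_constellation_alt (symptoms : List String) : List (String × String) :=
  if symptoms.isEmpty then
    [("cluster_type", "Asymptomatic"), ("direction", "Neutral"), ("urgency", "Low")]
  else
    let st := symptoms.foldl pvStepB (0, 0, false)
    let hyper_count := st.1
    let hypo_count := st.2.1
    let confusion_seen := st.2.2
    let dc : String × String :=
      if hyper_count > hypo_count then ("Hyperglycemic", "Hyperglycemia Cluster")
      else if hypo_count > hyper_count then ("Hypoglycemic", "Hypoglycemia Cluster")
      else ("Mixed", "Mixed Symptom Cluster")
    let urgency : String :=
      if confusion_seen then "High"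
      else if (symptoms.length : Int) ≥ 3 then "High"
      else if (symptoms.length : Int) = 2 then "Moderate"
      else "Low"
    [("cluster_type", dc.2), ("direction", dc.1), ("urgency", urgency)]

-- ===== PRECONDITION & SPEC =====
def Spec_analyze_symptom_constellation (symptoms : List String) (out : List (String × String)) : Prop := out = analyze_symptom_constellation_alt symptoms
instance (symptoms : List String) (out : List (String × String)) : Decidable (Spec_analyze_symptom_constellation symptoms out) := by unfold Spec_analyze_symptom_constellation; infer_instance

-- ===== CLAIM (what is proved, stated in full; the proofs are below) =====
def Claim_equal_analyze_symptom_constellation : Prop := ∀ (symptoms : List String), Dom_analyze_symptom_constellation symptoms → Spec_analyze_symptom_constellation symptoms (analyze_symptom_constellation symptoms)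

-- ===== LEMMAS AND PROOFS =====

-- the literal dict B builds, in plain association-list form
theorem pvCategory_eq : pvCategory = PySem.Dict.mk
    [("Unusual thirst or dry mouth", "hyper"),
     ("Frequent urination", "hyper"),
     ("Blurred vision", "hyper"),
     ("Shakiness or tremors", "hypo"),
     ("Confusion or difficulty concentrating", "hypo")] := by decide

-- one element of B's fused loop does what A's three per-category steps (plus the confusion check) do
theorem pvStepB_eq (st : Int × Int × Bool) (s : String) :
    pvStepB st s =
      ((if pvHyperL.contains s then st.1 + 1 else st.1),
       (if pvHypoL.contains s then st.2.1 + 1 else st.2.1),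
       st.2.2 || (s == pvConfusion)) := by
  by_cases h1 : s = "Unusual thirst or dry mouth"
  · subst h1
    have hg : pvCategory.get? "Unusual thirst or dry mouth" = some "hyper" := by decide
    have c3 : ("Unusual thirst or dry mouth" == pvConfusion) = false := by decide
    simp [pvStepB, hg, c3, pvHyperL, pvHypoL]
  by_cases h2 : s = "Frequent urination"
  · subst h2
    have hg : pvCategory.get? "Frequent urination" = some "hyper" := by decide
    have c3 : ("Frequent urination" == pvConfusion) = false := by decide
    simp [pvStepB, hg, c3, pvHyperL, pvHypoL]
  by_cases h3 : s = "Blurred vision"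
  · subst h3
    have hg : pvCategory.get? "Blurred vision" = some "hyper" := by decide
    have c3 : ("Blurred vision" == pvConfusion) = false := by decide
    simp [pvStepB, hg, c3, pvHyperL, pvHypoL]
  by_cases h4 : s = "Shakiness or tremors"
  · subst h4
    have hg : pvCategory.get? "Shakiness or tremors" = some "hypo" := by decide
    have c3 : ("Shakiness or tremors" == pvConfusion) = false := by decide
    simp [pvStepB, hg, c3, pvHyperL, pvHypoL]
  by_cases h5 : s = "Confusion or difficulty concentrating"
  · subst h5
    have hg : pvCategory.get? "Confusion or difficulty concentrating" = some "hypo" := by decide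
    have c3 : ("Confusion or difficulty concentrating" == pvConfusion) = true := by decide
    simp [pvStepB, hg, c3, pvHyperL, pvHypoL]
  · have f1 : ("Unusual thirst or dry mouth" == s) = false := by
      simp; exact Ne.symm h1
    have f2 : ("Frequent urination" == s) = false := by simp; exact Ne.symm h2
    have f3 : ("Blurred vision" == s) = false := by simp; exact Ne.symm h3
    have f4 : ("Shakiness or tremors" == s) = false := by simp; exact Ne.symm h4
    have f5 : ("Confusion or difficulty concentrating" == s) = false := by
      simp; exact Ne.symm h5
    have hg : pvCategory.get? s = none := by
      rw [pvCategory_eq]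
      simp only [PySem.Dict.get?_mk_cons, f1, f2, f3, f4, f5, Bool.false_eq_true, if_false]
      simp [PySem.Dict.get?]
    have c3 : (s == pvConfusion) = false := by simp [pvConfusion, h5]
    simp [pvStepB, hg, c3, pvHyperL, pvHypoL, h1, h2, h3, h4, h5]

-- B's single pass computes A's two used counts and the confusion membership flag
theorem pvFold_inv (ss : List String) (h k : Int) (c : Bool) :
    ss.foldl pvStepB (h, k, c) =
      (ss.foldl (fun acc s => if pvHyperL.contains s then acc + 1 else acc) h,
       ss.foldl (fun acc s => if pvHypoL.contains s then acc + 1 else acc) k,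
       c || ss.contains pvConfusion) := by
  induction ss generalizing h k c with
  | nil => simp
  | cons x xs ih =>
    simp only [List.foldl_cons, pvStepB_eq, ih, List.contains_cons]
    have hcomm : (x == pvConfusion) = (pvConfusion == x) := by
      by_cases hx : x = pvConfusion
      · subst hx; rfl
      · have h1 : (x == pvConfusion) = false := by simp [hx]
        have h2 : (pvConfusion == x) = false := by simp [Ne.symm hx]
        rw [h1, h2]
    rw [Prod.mk.injEq, Prod.mk.injEq]
    exact ⟨rfl, rfl, by rw [hcomm, Bool.or_assoc]⟩

-- ===== VERDICT (by name: the statement is the Claim_ definition above) =====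
theorem analyze_symptom_constellation_spec : Claim_equal_analyze_symptom_constellation := by
  intro symptoms _
  unfold Spec_analyze_symptom_constellation analyze_symptom_constellation analyze_symptom_constellation_alt
  by_cases he : symptoms.isEmpty
  · simp [he]
  · simp only [he, Bool.false_eq_true, if_false, pvFold_inv, Bool.false_or]
    simp [pvConfusion]
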